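-- pv_equiv track=rewrite | github.com/w1j0y/ig-content-intelligence | ig_classify_posts_basic.py | clean_text_for_model
-- ===== SOURCE A (Python) =====
-- def clean_text_for_model(text: str) -> str:
--     """
--     Clean raw_text to something more manageable for the model:
--     - Strip huge Instagram footer junk.
--     - Trim to max length (e.g. 4000 chars) to avoid token explosion.
--     """
--     if not text:
--         return ""
--
--     # Cut at "More posts from" etc if present
--     cut_markers = [
--         "More posts from",
--         "About Blog Jobs Help",
--         "Instagram from",
--         "Uploading & Non-Users",
--         "Privacy Terms",
--         "Meta ©",
--     ]
--     for marker in cut_markers: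
--         if marker in text:
--             text = text.split(marker)[0]
--
--     # Trim to 4000 chars max
--     max_len = 4000
--     if len(text) > max_len:
--         text = text[:max_len] + " ... [TRUNCATED]"
--
--     return text.strip()
-- ===== SOURCE B (Python) =====
-- def clean_text_for_model(text: str) -> str:
--     """
--     Same cleaning as the original, but cut once at the earliest footer-marker
--     occurrence instead of repeatedly splitting.
--     """
--     if not text:
--         return ""
--
--     cut_markers = [
--         "More posts from",
--         "About Blog Jobs Help",
--         "Instagram from",
--         "Uploading & Non-Users",
--         "Privacy Terms",
--         "Meta ©",
--     ]
--     positions = [i for i in (text.find(m) for m in cut_markers) if i != -1]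
--     idx = min(positions, default=None)
--     if idx is not None:
--         text = text[:idx]
--
--     max_len = 4000
--     if len(text) > max_len:
--         text = text[:max_len] + " ... [TRUNCATED]"
--
--     return text.strip()
-- ===== Notes on version B (the rewrite author's own statement) =====
-- stated objective: simpler
-- what changed: A repeatedly rewrites the text with text.split(marker)[0] for each of the six footer markers in turn; B scans once, collects the find() positions of the markers that occur, and slices the text a single time at the minimal position, which is provably the same result because no marker's proper suffix is prefix-comparable with another marker.
import Mathlib
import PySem

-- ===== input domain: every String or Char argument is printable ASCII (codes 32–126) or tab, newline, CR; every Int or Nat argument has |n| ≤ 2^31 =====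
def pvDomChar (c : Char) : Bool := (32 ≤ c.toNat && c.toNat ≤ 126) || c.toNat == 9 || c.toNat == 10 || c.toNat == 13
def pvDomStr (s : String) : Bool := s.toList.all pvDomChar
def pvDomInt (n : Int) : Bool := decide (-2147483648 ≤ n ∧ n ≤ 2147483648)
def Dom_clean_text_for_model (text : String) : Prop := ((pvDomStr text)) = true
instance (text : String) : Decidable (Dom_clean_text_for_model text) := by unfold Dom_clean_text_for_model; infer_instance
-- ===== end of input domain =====

-- B cuts once at the earliest footer-marker occurrence instead of A's repeated split-and-keep-head
-- loop; same truncation and strip, return values proved equal on all inputs.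

-- ===== PORT A =====
def pvMarkers : List String :=
  ["More posts from", "About Blog Jobs Help", "Instagram from",
   "Uploading & Non-Users", "Privacy Terms", "Meta ©"]

-- text = text.split(marker)[0]: split on a nonempty marker always yields a nonempty list, so [0] is its head
def pvCutA (t m : String) : String :=
  if PySem.Str.isIn m t then ((PySem.Str.split? t m).getD []).headD "" else t

def clean_text_for_model (text : String) : String :=
  if text = "" then ""
  else
    let t := pvMarkers.foldl pvCutA text
    let t2 := if PySem.Str.len t > 4000 then PySem.Str.slice t none (some 4000) ++ " ... [TRUNCATED]" else t
    PySem.Str.strip t2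

-- ===== PORT B =====
def clean_text_for_model_alt (text : String) : String :=
  if text = "" then ""
  else
    let positions := pvMarkers.filterMap (fun m =>
      let i := PySem.Str.find text m
      if i != -1 then some i else none)
    let t := match PySem.List.min? positions (fun i => i) with
      | none => text
      | some i => PySem.Str.slice text none (some i)
    let t2 := if PySem.Str.len t > 4000 then PySem.Str.slice t none (some 4000) ++ " ... [TRUNCATED]" else t
    PySem.Str.strip t2

-- ===== PRECONDITION & SPEC =====
def Spec_clean_text_for_model (text : String) (out : String) : Prop := out = clean_text_for_model_alt text
instance (text : String) (out : String) : Decidable (Spec_clean_text_for_model text out) := by unfold Spec_clean_text_for_model; infer_instance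

-- ===== CLAIM (what is proved, stated in full; the proofs are below) =====
def Claim_equal_clean_text_for_model : Prop := ∀ (text : String), Dom_clean_text_for_model text → Spec_clean_text_for_model text (clean_text_for_model text)

-- ===== LEMMAS AND PROOFS =====

theorem find_go_off (sep l : List Char) (k : Nat) :
    PySem.Chars.find.go sep l k =
      if PySem.Chars.find.go sep l 0 = -1 then -1 else PySem.Chars.find.go sep l 0 + k := by
  induction l generalizing k with
  | nil => simp [PySem.Chars.find.go]; split <;> simp
  | cons c rest ih =>
    have hge : -1 ≤ PySem.Chars.find.go sep rest 0 := PySem.Chars.neg_one_le_find rest sep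
    rw [PySem.Chars.find.go]
    conv_rhs => rw [PySem.Chars.find.go]
    by_cases hp : sep.isPrefixOf (c :: rest)
    · simp [hp]
    · simp only [hp, if_false, Bool.false_eq_true]
      rw [ih (k+1), ih 1]
      split
      · simp
      · rename_i h
        rw [if_neg (by omega)]
        push_cast; ring

def fposC (t m : List Char) : Option Nat :=
  if PySem.Chars.find t m = -1 then none else some (PySem.Chars.find t m).toNat

theorem fposC_eq_none_iff {t m : List Char} :
    fposC t m = none ↔ ∀ j, ¬ m <+: t.drop j := by
  unfold fposC
  constructor
  · intro h j hpre
    split at h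
    · rename_i hfind
      rw [PySem.Chars.find_eq_neg_one_iff] at hfind
      exact hfind ((PySem.Chars.isIn_iff_infix m t).mp
        ((PySem.Chars.exists_prefix_drop_iff_isIn m t).mp ⟨j, hpre⟩))
    · exact absurd h (by simp)
  · intro h
    rw [if_pos]
    rw [PySem.Chars.find_eq_neg_one_iff]
    intro hinf
    obtain ⟨j, hj⟩ := (PySem.Chars.exists_prefix_drop_iff_isIn m t).mpr
      ((PySem.Chars.isIn_iff_infix m t).mpr hinf)
    exact h j hj

theorem fposC_eq_some_iff {t m : List Char} {i : Nat} :
    fposC t m = some i ↔ (m <+: t.drop i ∧ ∀ j < i, ¬ m <+: t.drop j) := by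
  unfold fposC
  constructor
  · intro h
    split at h
    · exact absurd h (by simp)
    · rename_i hne
      have h0 : 0 ≤ PySem.Chars.find t m := by
        have := PySem.Chars.neg_one_le_find t m; omega
      obtain ⟨h1, h2⟩ := PySem.Chars.find_spec h0
      obtain rfl : (PySem.Chars.find t m).toNat = i := by injection h
      exact ⟨h1, h2⟩
  · rintro ⟨h1, h2⟩
    have hin : PySem.Chars.isIn m t = true := by
      rw [← PySem.Chars.exists_prefix_drop_iff_isIn]; exact ⟨i, h1⟩
    have hne : PySem.Chars.find t m ≠ -1 := by
      intro h; rw [PySem.Chars.find_eq_neg_one_iff] at h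
      rw [PySem.Chars.isIn_iff_infix] at hin; exact h hin
    rw [if_neg hne]
    have h0 : 0 ≤ PySem.Chars.find t m := by
      have := PySem.Chars.neg_one_le_find t m; omega
    obtain ⟨g1, g2⟩ := PySem.Chars.find_spec h0
    have : (PySem.Chars.find t m).toNat = i := by
      rcases Nat.lt_trichotomy (PySem.Chars.find t m).toNat i with h | h | h
      · exact absurd g1 (h2 _ h)
      · exact h
      · exact absurd h1 (g2 _ h)
    simp [this]

theorem fposC_le {t m : List Char} (hm : m ≠ []) {k : Nat} (h : fposC t m = some k) :
    k + m.length ≤ t.length := by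
  obtain ⟨h1, -⟩ := fposC_eq_some_iff.mp h
  have hlen := h1.length_le
  rw [List.length_drop] at hlen
  have hk : k < t.length := by
    by_contra hk
    rw [List.drop_eq_nil_of_le (by omega)] at h1
    exact hm (List.prefix_nil.mp h1)
  omega

theorem splitOn_go_head (sep : List Char) :
    ∀ (fuel : Nat) (l cur acc : List Char) (accs : List (List Char)), True →
      (PySem.Chars.splitOn.go sep fuel l cur (acc :: accs)).head? = (acc :: accs).getLast? := by
  intro fuel
  induction fuel with
  | zero => intro l cur acc accs _; simp [PySem.Chars.splitOn.go, List.getLast?_cons]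
  | succ f ih =>
    intro l cur acc accs _
    match l with
    | [] => simp [PySem.Chars.splitOn.go, List.getLast?_cons]
    | c :: rest =>
      rw [PySem.Chars.splitOn.go]
      by_cases hp : sep.isPrefixOf (c :: rest)
      · simp only [hp, if_true]
        rw [ih _ _ _ _ trivial]
        simp [List.getLast?_cons]
      · simp only [hp, Bool.false_eq_true, if_false]
        exact ih _ _ _ _ trivial

theorem fposC_nil {sep : List Char} (hsep : sep ≠ []) : fposC [] sep = none := by
  unfold fposC PySem.Chars.find
  rw [PySem.Chars.find.go]
  simp [hsep]

theorem fposC_cons_pre {sep : List Char} (c : Char) (rest : List Char)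
    (hp : sep.isPrefixOf (c :: rest) = true) : fposC (c :: rest) sep = some 0 := by
  unfold fposC PySem.Chars.find
  rw [PySem.Chars.find.go]
  simp [hp]

theorem fposC_cons_npre {sep : List Char} (c : Char) (rest : List Char)
    (hp : ¬ sep.isPrefixOf (c :: rest) = true) :
    fposC (c :: rest) sep = (fposC rest sep).map (· + 1) := by
  unfold fposC PySem.Chars.find
  rw [PySem.Chars.find.go]
  simp only [hp, Bool.false_eq_true, if_false]
  rw [find_go_off]
  have hge := PySem.Chars.neg_one_le_find rest sep
  unfold PySem.Chars.find at hge
  by_cases h : PySem.Chars.find.go sep rest 0 = -1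
  · simp [h]
  · rw [if_neg h, if_neg h, if_neg (by omega)]
    simp only [Option.map_some]
    congr 1
    omega

theorem splitOn_go_head_nil (sep : List Char) (hsep : sep ≠ []) :
    ∀ (l : List Char) (fuel : Nat) (cur : List Char), l.length ≤ fuel →
      (PySem.Chars.splitOn.go sep fuel l cur []).head? =
        some (cur.reverse ++ (match fposC l sep with | none => l | some k => l.take k)) := by
  intro l
  induction l with
  | nil =>
    intro fuel cur _
    rw [fposC_nil hsep]
    match fuel with
    | 0 => simp [PySem.Chars.splitOn.go]
    | f + 1 => simp [PySem.Chars.splitOn.go]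
  | cons c rest ih =>
    intro fuel cur hf
    match fuel with
    | f + 1 =>
      rw [PySem.Chars.splitOn.go]
      by_cases hp : sep.isPrefixOf (c :: rest)
      · simp only [hp, if_true]
        rw [fposC_cons_pre c rest hp, splitOn_go_head sep _ _ _ _ _ trivial]
        simp
      · simp only [hp, Bool.false_eq_true, if_false]
        rw [ih f (c :: cur) (by simpa using hf), fposC_cons_npre c rest hp]
        cases h : fposC rest sep <;> simp

def cutC (t m : List Char) : List Char :=
  match fposC t m with
  | none => t
  | some k => t.take k

theorem splitOn_head {s sep : List Char} (hsep : sep ≠ []) :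
    (PySem.Chars.splitOn s sep).headD [] = cutC s sep := by
  unfold PySem.Chars.splitOn cutC
  rw [List.headD_eq_head?_getD, splitOn_go_head_nil sep hsep s (s.length + 1) [] (by omega)]
  simp

theorem cutA_toList (t m : String) (hm : m.toList ≠ []) :
    (pvCutA t m).toList = cutC t.toList m.toList := by
  unfold pvCutA
  by_cases hin : PySem.Str.isIn m t
  · rw [if_pos hin]
    have hsp := PySem.Str.split?_map t m
    rw [PySem.Chars.split?] at hsp
    rw [if_neg (by simpa using hm)] at hsp
    obtain ⟨ls, hls⟩ : ∃ ls, PySem.Str.split? t m = some ls := by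
      cases h : PySem.Str.split? t m
      · rw [h] at hsp; simp at hsp
      · exact ⟨_, rfl⟩
    rw [hls] at hsp
    simp only [Option.map_some, Option.some.injEq] at hsp
    rw [hls]
    simp only [Option.getD_some]
    rw [← splitOn_head (by simpa using hm), ← hsp]
    cases ls <;> simp
  · rw [if_neg hin]
    have : PySem.Chars.isIn m.toList t.toList = false := by
      rw [← PySem.Str.isIn_eq]; simpa using hin
    unfold PySem.Chars.isIn at this
    have hfind : PySem.Chars.find t.toList m.toList = -1 := by
      simpa using this
    unfold cutC fposC
    rw [if_pos hfind]

theorem foldl_cutA_toList (ms : List String) (t : String) (h : ∀ m ∈ ms, m.toList ≠ []) :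
    (ms.foldl pvCutA t).toList = (ms.map String.toList).foldl cutC t.toList := by
  induction ms generalizing t with
  | nil => rfl
  | cons m ms ih =>
    simp only [List.foldl_cons, List.map_cons]
    rw [ih _ (fun x hx => h x (List.mem_cons_of_mem _ hx)),
      cutA_toList t m (h m (List.mem_cons_self ..))]

def NoOv (m' m : List Char) : Prop :=
  ∀ j, j < m'.length → 0 < j → ¬ (m'.drop j <+: m) ∧ ¬ (m <+: m'.drop j)

theorem fposC_take {t m m' : List Char} {k : Nat} (hm' : m' ≠ [])
    (hocc : m <+: t.drop k) (hnov : NoOv m' m) :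
    fposC (t.take k) m' = (fposC t m').bind (fun i => if i < k then some i else none) := by
  have copy : ∀ j, m' <+: (t.take k).drop j → m' <+: t.drop j ∧ m'.length + j ≤ k := by
    intro j hj
    rw [List.drop_take] at hj
    have h1 : m' <+: t.drop j := hj.trans (List.take_prefix _ _)
    have h2 := hj.length_le
    rw [List.length_take, List.length_drop] at h2
    have hlen : 0 < m'.length := List.length_pos_of_ne_nil hm'
    exact ⟨h1, by omega⟩
  cases hcase : fposC t m' with
  | none =>
    simp only [Option.bind_none]
    rw [fposC_eq_none_iff] at hcase ⊢
    intro j hj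
    exact hcase j (copy j hj).1
  | some i =>
    rw [fposC_eq_some_iff] at hcase
    obtain ⟨hi, hmin⟩ := hcase
    simp only [Option.bind_some]
    by_cases hik : i < k
    · rw [if_pos hik]
      -- no straddle: i + m'.length ≤ k
      have hfit : i + m'.length ≤ k := by
        by_contra hbad
        rw [not_le] at hbad
        set j := k - i with hj
        have hj1 : 0 < j := by omega
        have hj2 : j < m'.length := by omega
        have hd1 : m'.drop j <+: t.drop k := by
          have := hi.drop j
          rwa [List.drop_drop, Nat.add_comm, show j + i = k by omega] at this
          -- drop_drop orientation may need adjusting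
        rcases List.prefix_or_prefix_of_prefix hd1 hocc with hc | hc
        · exact (hnov j hj2 hj1).1 hc
        · exact (hnov j hj2 hj1).2 hc
      rw [fposC_eq_some_iff]
      constructor
      · rw [List.drop_take]
        rw [List.prefix_take_iff]
        exact ⟨hi, by omega⟩
      · intro j hj hpre
        exact hmin j hj (copy j hpre).1
    · rw [if_neg hik]
      rw [fposC_eq_none_iff]
      intro j hj
      obtain ⟨h1, h2⟩ := copy j hj
      have : i ≤ j := by
        by_contra hc
        exact hmin j (by omega) h1
      have hlen : 0 < m'.length := List.length_pos_of_ne_nil hm'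
      omega

theorem filterMap_fposC_take {t m : List Char} {k : Nat} (ms : List (List Char))
    (hne : ∀ m' ∈ ms, m' ≠ []) (hocc : m <+: t.drop k) (hnov : ∀ m' ∈ ms, NoOv m' m) :
    ms.filterMap (fposC (t.take k)) = (ms.filterMap (fposC t)).filter (fun p => p < k) := by
  induction ms with
  | nil => rfl
  | cons m' ms ih =>
    simp only [List.filterMap_cons]
    rw [fposC_take (hne m' (List.mem_cons_self ..)) hocc (hnov m' (List.mem_cons_self ..))]
    cases h : fposC t m' with
    | none =>
      simp only [Option.bind_none]
      exact ih (fun x hx => hne x (List.mem_cons_of_mem _ hx))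
        (fun x hx => hnov x (List.mem_cons_of_mem _ hx))
    | some i =>
      simp only [Option.bind_some]
      by_cases hik : i < k
      · rw [if_pos hik]
        simp only [List.filter_cons, decide_eq_true_eq, if_pos hik]
        rw [ih (fun x hx => hne x (List.mem_cons_of_mem _ hx))
          (fun x hx => hnov x (List.mem_cons_of_mem _ hx))]
      · rw [if_neg hik]
        simp only [List.filter_cons, decide_eq_true_eq, if_neg hik]
        exact ih (fun x hx => hne x (List.mem_cons_of_mem _ hx))
          (fun x hx => hnov x (List.mem_cons_of_mem _ hx))

theorem foldl_min_le_init (l : List Nat) (a : Nat) : l.foldl min a ≤ a := by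
  induction l generalizing a with
  | nil => simp
  | cons x l ih => exact le_trans (ih _) (min_le_left _ _)

theorem foldl_min_le_mem (l : List Nat) (a x : Nat) (hx : x ∈ l) : l.foldl min a ≤ x := by
  induction l generalizing a with
  | nil => cases hx
  | cons y l ih =>
    simp only [List.foldl_cons]
    rcases List.mem_cons.mp hx with rfl | hx'
    · exact le_trans (foldl_min_le_init _ _) (min_le_right _ _)
    · exact ih _ hx'

theorem foldl_min_mem_or (l : List Nat) (a : Nat) :
    l.foldl min a = a ∨ l.foldl min a ∈ l := by
  induction l generalizing a with
  | nil => left; rfl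
  | cons x l ih =>
    simp only [List.foldl_cons]
    rcases ih (min a x) with h | h
    · rcases Nat.le_total a x with hax | hax
      · left; rw [h]; omega
      · right; rw [h, show min a x = x by omega]; exact List.mem_cons_self ..
    · right; exact List.mem_cons_of_mem _ h

theorem foldl_min_filter_lt (l : List Nat) (k : Nat) :
    ∀ a, a ≤ k → (l.filter (fun p => p < k)).foldl min a = l.foldl min a := by
  induction l with
  | nil => intro a _; rfl
  | cons x l ih =>
    intro a ha
    simp only [List.filter_cons, decide_eq_true_eq, List.foldl_cons]
    by_cases hx : x < k
    · rw [if_pos hx]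
      simp only [List.foldl_cons]
      exact ih _ (by omega)
    · rw [if_neg hx]
      have hmin : min a x = a := by omega
      rw [hmin]
      exact ih _ ha

def minPosC (ms : List (List Char)) (t : List Char) : Nat :=
  (ms.filterMap (fposC t)).foldl min t.length

theorem foldl_cutC_eq_take (ms : List (List Char)) :
    ∀ (t : List Char), (∀ m ∈ ms, m ≠ []) → ms.Pairwise (fun a b => NoOv b a) →
    ms.foldl cutC t = t.take (minPosC ms t) := by
  induction ms with
  | nil => intro t _ _; simp [minPosC]
  | cons m ms ih =>
    intro t hne hpw
    have hmne : m ≠ [] := hne m (List.mem_cons_self ..)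
    have hne' : ∀ m' ∈ ms, m' ≠ [] := fun x hx => hne x (List.mem_cons_of_mem _ hx)
    obtain ⟨hhead, hpw'⟩ := List.pairwise_cons.mp hpw
    simp only [List.foldl_cons]
    cases hk : fposC t m with
    | none =>
      have hcut : cutC t m = t := by unfold cutC; rw [hk]
      rw [hcut, ih t hne' hpw']
      unfold minPosC
      simp only [List.filterMap_cons, hk]
    | some k =>
      obtain ⟨hocc, -⟩ := fposC_eq_some_iff.mp hk
      have hkle : k + m.length ≤ t.length := fposC_le hmne hk
      have hcut : cutC t m = t.take k := by unfold cutC; rw [hk]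
      rw [hcut, ih _ hne' hpw']
      unfold minPosC
      rw [filterMap_fposC_take ms hne' hocc hhead]
      have hlen : (t.take k).length = k := by
        rw [List.length_take]; omega
      rw [hlen, foldl_min_filter_lt _ k k le_rfl]
      simp only [List.filterMap_cons, hk, List.foldl_cons]
      have h1 : min t.length k = k := by omega
      rw [h1, List.take_take]
      congr 1
      have := foldl_min_le_init (ms.filterMap (fposC t)) k
      omega

theorem positions_eq_gen (ms : List String) (text : String) :
    (ms.filterMap (fun m =>
      let i := PySem.Str.find text m
      if i != -1 then some i else none)) =
    ((ms.map String.toList).filterMap (fposC text.toList)).map (fun (n : Nat) => (n : Int)) := by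
  induction ms with
  | nil => rfl
  | cons m ms ih =>
    have hfind : PySem.Str.find text m = PySem.Chars.find text.toList m.toList :=
      PySem.Str.find_eq text m
    have hge : -1 ≤ PySem.Chars.find text.toList m.toList := PySem.Chars.neg_one_le_find _ _
    simp only [List.map_cons]
    by_cases h : PySem.Chars.find text.toList m.toList = -1
    · have hnone : fposC text.toList m.toList = none := by unfold fposC; rw [if_pos h]
      rw [List.filterMap_cons_none (by simp [h]), List.filterMap_cons_none hnone, ih]
    · have hsome : fposC text.toList m.toList = some (PySem.Chars.find text.toList m.toList).toNat := by
        unfold fposC; rw [if_neg h]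
      rw [List.filterMap_cons_some (f := fun m =>
            let i := PySem.Str.find text m
            if i != -1 then some i else none)
          (by simp only [hfind]; rw [if_pos (by simpa using h)]),
        List.filterMap_cons_some hsome, List.map_cons, ih]
      congr 1
      omega

def pvMarkersC : List (List Char) := pvMarkers.map String.toList

theorem mem_natP_le {text : String} {n : Nat}
    (hn : n ∈ pvMarkersC.filterMap (fposC text.toList)) : n ≤ text.toList.length := by
  obtain ⟨m', hm', hf⟩ := List.mem_filterMap.mp hn
  have hne : m' ≠ [] := by
    have : ∀ x ∈ pvMarkersC, x ≠ [] := by decide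
    exact this m' hm'
  have := fposC_le hne hf
  omega

theorem cut_strings_eq (text : String) :
    pvMarkers.foldl pvCutA text =
      (match PySem.List.min? (pvMarkers.filterMap (fun m =>
          let i := PySem.Str.find text m
          if i != -1 then some i else none)) (fun i => i) with
        | none => text
        | some i => PySem.Str.slice text none (some i)) := by
  apply String.toList_inj.mp
  have hne : ∀ m ∈ pvMarkers, m.toList ≠ [] := by decide
  have hneC : ∀ m ∈ pvMarkersC, m ≠ [] := by decide
  have hpw : pvMarkersC.Pairwise (fun a b => NoOv b a) := by
    unfold pvMarkersC pvMarkers NoOv; decide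
  have hA : (pvMarkers.foldl pvCutA text).toList =
      text.toList.take (minPosC pvMarkersC text.toList) := by
    rw [foldl_cutA_toList pvMarkers text hne]
    exact foldl_cutC_eq_take pvMarkersC text.toList hneC hpw
  rw [hA, positions_eq_gen]
  have hMC : pvMarkers.map String.toList = pvMarkersC := rfl
  rw [hMC]
  cases hmin : PySem.List.min?
      ((pvMarkersC.filterMap (fposC text.toList)).map (fun (n : Nat) => (n : Int))) (fun i => i) with
  | none =>
    rw [PySem.List.min?_eq_none_iff, List.map_eq_nil_iff] at hmin
    unfold minPosC
    rw [hmin]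
    simp
  | some i =>
    have hmem := PySem.List.min?_mem hmin
    have hminle := PySem.List.min?_isMin hmin
    obtain ⟨n0, hn0, hcast⟩ := List.mem_map.mp hmem
    have h0i : 0 ≤ i := by omega
    have hFn : minPosC pvMarkersC text.toList = i.toNat := by
      unfold minPosC
      have hle1 : (pvMarkersC.filterMap (fposC text.toList)).foldl min text.toList.length ≤ i.toNat := by
        have := foldl_min_le_mem (pvMarkersC.filterMap (fposC text.toList)) text.toList.length n0 hn0
        omega
      rcases foldl_min_mem_or (pvMarkersC.filterMap (fposC text.toList)) text.toList.length with h | h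
      · have h2 : i.toNat ≤ text.toList.length := by
          have := mem_natP_le (text := text) hn0
          omega
        omega
      · have h3 : i ≤ (((pvMarkersC.filterMap (fposC text.toList)).foldl min text.toList.length : Nat) : Int) := by
          apply hminle
          exact List.mem_map.mpr ⟨_, h, rfl⟩
        omega
    rw [hFn]
    simp only [PySem.Str.toList_slice, PySem.Chars.slice_eq_listSlice]
    rw [PySem.List.slice_to _ h0i]

-- ===== VERDICT (by name: the statement is the Claim_ definition above) =====
theorem clean_text_for_model_spec : Claim_equal_clean_text_for_model := by
  intro text _
  unfold Spec_clean_text_for_model clean_text_for_model clean_text_for_model_alt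
  by_cases h : text = ""
  · simp [h]
  · simp only [if_neg h]
    rw [cut_strings_eq text]
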